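-- pv_equiv track=rewrite | github.com/bmuralid/Pure-Fortran | xf2p.py | _is_fortran_string_literal
-- ===== SOURCE A (Python) =====
-- def _is_fortran_string_literal(s: str) -> bool:
--     s = s.strip()
--     if len(s) < 2 or s[0] not in ("'", "\""):
--         return False
--     q = s[0]
--     i = 1
--     n = len(s)
--     while i < n:
--         if s[i] == q:
--             if i + 1 < n and s[i + 1] == q:
--                 i += 2
--                 continue
--             i += 1
--             while i < n and s[i].isspace():
--                 i += 1
--             return i == n
--         i += 1
--     return False
-- ===== SOURCE B (Python) =====
-- def _is_fortran_string_literal(s: str) -> bool: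
--     s = s.strip()
--     if len(s) < 2:
--         return False
--     q = s[0]
--     if q not in ("'", '"') or s[-1] != q:
--         return False
--     # interior must contain q only as doubled quotes: removing left-to-right
--     # non-overlapping pairs leaves none behind
--     return q not in s[1:-1].replace(q + q, "")
-- ===== Notes on version B (the rewrite author's own statement) =====
-- stated objective: simpler
-- what changed: Replaces the explicit index-based scanning state machine (with its inner whitespace-skipping loop) by a single declarative check: after strip, the string must start and end with the same quote and its interior, with doubled quotes removed left-to-right via str.replace, must contain no further quote.
import Mathlib
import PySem

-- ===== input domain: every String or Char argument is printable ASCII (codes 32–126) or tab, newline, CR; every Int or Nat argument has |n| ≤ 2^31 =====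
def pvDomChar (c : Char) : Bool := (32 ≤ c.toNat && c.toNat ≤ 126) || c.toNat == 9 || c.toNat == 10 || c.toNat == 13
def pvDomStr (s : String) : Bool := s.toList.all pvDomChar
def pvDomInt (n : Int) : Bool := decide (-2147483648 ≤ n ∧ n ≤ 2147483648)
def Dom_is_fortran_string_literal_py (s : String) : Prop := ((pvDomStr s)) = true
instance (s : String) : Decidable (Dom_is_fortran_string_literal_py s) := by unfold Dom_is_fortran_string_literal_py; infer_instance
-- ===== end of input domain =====

-- B replaces A's index-based scanning state machine by a declarative quote/interior check
-- built on str.replace (objective: simpler); both are total, return values proved equal everywhere.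

-- ===== PORT A =====
-- A's while loop over index i, ported as structural recursion over the remaining suffix
-- (all accesses are s[i]/s[i+1] moving forward); the inner whitespace-skip loop followed by
-- 'return i == n' is 'dropWhile isspace' followed by the emptiness test.
def pvScanA (q : Char) : List Char → Bool
  | [] => false                                      -- while exits: return False
  | c :: rest =>
    if c == q then
      match rest with
      | c2 :: rest2 =>
          if c2 == q then pvScanA q rest2            -- doubled quote: i += 2; continue
          else ((c2 :: rest2).dropWhile PySem.Chars.isspace).isEmpty  -- i += 1; skip spaces; return i == n
      | [] => true                                   -- i += 1 reaches n: return i == n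
    else pvScanA q rest                              -- i += 1

def is_fortran_string_literal_py (s : String) : Bool :=
  match PySem.Chars.strip s.toList with
  | [] => false                                      -- len(s) < 2
  | c0 :: rest =>
    if rest.isEmpty || !(c0 == '\'' || c0 == '"') then false  -- len(s) < 2 or s[0] not in ("'", '"')
    else pvScanA c0 rest                             -- q = s[0]; i = 1; while …

-- ===== PORT B =====
def is_fortran_string_literal_py_alt (s : String) : Bool :=
  let t := PySem.Chars.strip s.toList                -- s = s.strip()
  if t.length < 2 then false                         -- if len(s) < 2: return False
  else
    match t with
    | [] => false                                    -- unreachable (length ≥ 2)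
    | q :: _ =>                                      -- q = s[0]
      if !(q == '\'' || q == '"') || !(PySem.List.pyGet? t (-1) == some q) then false
        -- if q not in ("'", '"') or s[-1] != q: return False
      else !(PySem.Chars.isIn [q] (PySem.Chars.replace (PySem.List.slice t (some 1) (some (-1))) [q, q] []))
        -- return q not in s[1:-1].replace(q + q, "")

-- ===== PRECONDITION & SPEC =====
def Spec_is_fortran_string_literal_py (s : String) (out : Bool) : Prop := out = is_fortran_string_literal_py_alt s
instance (s : String) (out : Bool) : Decidable (Spec_is_fortran_string_literal_py s out) := by unfold Spec_is_fortran_string_literal_py; infer_instance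

-- ===== CLAIM (what is proved, stated in full; the proofs are below) =====
def Claim_equal_is_fortran_string_literal_py : Prop := ∀ (s : String), Dom_is_fortran_string_literal_py s → Spec_is_fortran_string_literal_py s (is_fortran_string_literal_py s)

-- ===== LEMMAS AND PROOFS =====

-- Proof-side recursion computing PySem.Chars.replace m [q,q] [] (greedy left-to-right pair removal).
def pvRepl (q : Char) : List Char → List Char
  | [] => []
  | [c] => [c]
  | c :: rest@(c2 :: t2) =>
    if c == q then
      (if c2 == q then pvRepl q t2 else c :: pvRepl q rest)
    else c :: pvRepl q rest

lemma pvRepl_cons_ne (q c : Char) (hcb : (c == q) = false) (t : List Char) :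
    pvRepl q (c :: t) = c :: pvRepl q t := by
  match t with
  | [] => simp [pvRepl]
  | c2 :: t2 => simp [pvRepl, hcb]

lemma pvRepl_go (q : Char) : ∀ (fuel : Nat) (l acc : List Char), l.length ≤ fuel →
    PySem.Chars.replace.go [q, q] [] fuel l acc = acc.reverse ++ pvRepl q l := by
  intro fuel
  induction fuel with
  | zero =>
      intro l acc h
      have : l = [] := List.length_eq_zero_iff.mp (Nat.le_zero.mp h)
      subst this
      simp [PySem.Chars.replace.go, pvRepl]
  | succ n ih =>
      intro l acc h
      match l with
      | [] => simp [PySem.Chars.replace.go, pvRepl]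
      | c :: t =>
        by_cases hp : [q, q].isPrefixOf (c :: t) = true
        · obtain ⟨t2, rfl, rfl⟩ : ∃ t2, t = c :: t2 ∧ q = c := by
            match t with
            | [] => simp [List.isPrefixOf] at hp
            | c2 :: t2 =>
              simp [List.isPrefixOf] at hp
              exact ⟨t2, by rw [show c = c2 from hp.1.symm.trans hp.2], hp.1⟩
          rw [show PySem.Chars.replace.go [q, q] [] (n+1) (q :: q :: t2) acc
                = PySem.Chars.replace.go [q, q] [] n t2 acc from by
              simp [PySem.Chars.replace.go, hp]]
          rw [ih t2 acc (by simp at h; omega)]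
          simp [pvRepl]
        · rw [show PySem.Chars.replace.go [q, q] [] (n+1) (c :: t) acc
                = PySem.Chars.replace.go [q, q] [] n t (c :: acc) from by
              simp only [PySem.Chars.replace.go]
              simp [hp]]
          rw [ih t (c :: acc) (by simp at h; omega)]
          have hrepl : pvRepl q (c :: t) = c :: pvRepl q t := by
            by_cases hc : q = c
            · subst hc
              match t with
              | [] => simp [pvRepl]
              | c2 :: t2 =>
                have hc2 : (c2 == q) = false := by
                  simp only [beq_eq_false_iff_ne, ne_eq]
                  intro hc2; rw [hc2] at hp; simp [List.isPrefixOf] at hp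
                simp [pvRepl, hc2]
            · exact pvRepl_cons_ne q c (by simp only [beq_eq_false_iff_ne, ne_eq]; exact fun h => hc h.symm) t
          rw [hrepl]; simp

lemma replace_eq_pvRepl (q : Char) (m : List Char) :
    PySem.Chars.replace m [q, q] [] = pvRepl q m := by
  rw [show PySem.Chars.replace m [q, q] [] = PySem.Chars.replace.go [q, q] [] m.length m [] from by
        simp [PySem.Chars.replace]]
  rw [pvRepl_go q m.length m [] le_rfl]
  simp

lemma isIn_singleton_eq_contains (q : Char) (X : List Char) :
    PySem.Chars.isIn [q] X = X.contains q := by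
  by_cases h : q ∈ X
  · have : PySem.Chars.isIn [q] X = true :=
      (PySem.Chars.isIn_iff_infix [q] X).mpr ((List.singleton_infix_iff q X).mpr h)
    simp [this, h]
  · have : PySem.Chars.isIn [q] X = false :=
      (PySem.Chars.isIn_eq_false_iff [q] X).mpr (fun hc => h ((List.singleton_infix_iff q X).mp hc))
    simp [this, h]

lemma dropWhile_ne_nil_of_last (l : List Char) (x : Char)
    (hx : l.getLast? = some x) (hsp : PySem.Chars.isspace x = false) :
    (l.dropWhile PySem.Chars.isspace).isEmpty = false := by
  induction l with
  | nil => simp at hx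
  | cons c t ih =>
      by_cases hc : PySem.Chars.isspace c = true
      · match t with
        | [] =>
            simp at hx; subst hx
            rw [hsp] at hc; simp at hc
        | d :: t2 =>
            rw [List.getLast?_cons_cons] at hx
            rw [List.dropWhile_cons_of_pos hc]
            exact ih hx
      · rw [List.dropWhile_cons_of_neg hc]; simp

lemma strip_getLast_not_space (s : List Char) (x : Char)
    (hx : (PySem.Chars.strip s).getLast? = some x) : PySem.Chars.isspace x = false := by
  have : PySem.Chars.strip s = (List.dropWhile PySem.Chars.isspace (PySem.Chars.lstrip s).reverse).reverse := by
    simp [PySem.Chars.strip, PySem.Chars.rstrip]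
  rw [this] at hx
  rw [List.getLast?_reverse] at hx
  match hd : List.dropWhile PySem.Chars.isspace (PySem.Chars.lstrip s).reverse with
  | [] => rw [hd] at hx; simp at hx
  | c :: t =>
      rw [hd] at hx; simp at hx; subst hx
      have hw : List.dropWhile PySem.Chars.isspace (PySem.Chars.lstrip s).reverse ≠ [] := by
        rw [hd]; simp
      have hhead := List.head_dropWhile_not (p := PySem.Chars.isspace)
        (l := (PySem.Chars.lstrip s).reverse) (w := hw)
      have h2 : (List.dropWhile PySem.Chars.isspace (PySem.Chars.lstrip s).reverse).head? = some c := by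
        rw [hd]; rfl
      rw [List.head?_eq_head hw] at h2
      simp only [Option.some_inj] at h2
      rw [h2] at hhead
      simpa using hhead

-- The central invariant: A's scan of the part after the opening quote succeeds iff the last
-- character is the quote and greedy pair-removal leaves no quote in the interior.
lemma scanA_eq (q : Char) : ∀ (L : List Char),
    (∀ x, L.getLast? = some x → PySem.Chars.isspace x = false) →
    pvScanA q L = ((L.getLast? == some q) && !((pvRepl q L.dropLast).contains q)) := by
  intro L
  induction hn : L.length using Nat.strong_induction_on generalizing L with
  | _ n ih =>
    match L with
    | [] => intro _; simp [pvScanA]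
    | [c] =>
        intro _
        by_cases hc : q = c
        · subst hc; simp [pvScanA, pvRepl]
        · have hcb : (c == q) = false := by
            simp only [beq_eq_false_iff_ne, ne_eq]; exact fun h => hc h.symm
          simp [pvScanA, pvRepl, hcb]
    | c :: c2 :: rest2 =>
        intro hsp
        by_cases hc : q = c
        · subst hc
          by_cases hc2 : q = c2
          · subst hc2
            match rest2 with
            | [] => simp [pvScanA, pvRepl]
            | d :: r =>
                have hstep : pvScanA q (q :: q :: d :: r) = pvScanA q (d :: r) := by
                  simp [pvScanA]
                rw [hstep]
                rw [ih (d :: r).length (by subst hn; simp) (d :: r) rfl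
                      (fun x hx => hsp x (by rw [List.getLast?_cons_cons, List.getLast?_cons_cons]; exact hx))]
                rw [List.getLast?_cons_cons, List.getLast?_cons_cons]
                rw [List.dropLast_cons₂, List.dropLast_cons₂]
                rw [show pvRepl q (q :: q :: (d :: r).dropLast) = pvRepl q (d :: r).dropLast from by
                      simp [pvRepl]]
          · -- single quote followed by a non-quote: A skips spaces and compares to n;
            -- since the last character is not a space the tail is never exhausted.
            have hc2b : (c2 == q) = false := by
              simp only [beq_eq_false_iff_ne, ne_eq]; exact fun h => hc2 h.symm
            obtain ⟨x, hx⟩ : ∃ x, (c2 :: rest2).getLast? = some x := by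
              cases hgl : (c2 :: rest2).getLast? with
              | none => simp at hgl
              | some y => exact ⟨y, rfl⟩
            have hxs : PySem.Chars.isspace x = false := hsp x (by rw [List.getLast?_cons_cons]; exact hx)
            have hA : pvScanA q (q :: c2 :: rest2) = false := by
              simp only [pvScanA, beq_self_eq_true, if_true]
              simp [hc2b, dropWhile_ne_nil_of_last (c2 :: rest2) x hx hxs]
            rw [hA]
            rw [List.dropLast_cons₂]
            have hqmem : (pvRepl q (q :: (c2 :: rest2).dropLast)).contains q = true := by
              match hdl : (c2 :: rest2).dropLast with
              | [] => simp [pvRepl]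
              | d :: m2 =>
                  have hd : d = c2 := by
                    match rest2 with
                    | [] => simp at hdl
                    | e :: r2 => rw [List.dropLast_cons₂] at hdl; simp at hdl; exact hdl.1.symm
                  subst hd
                  simp [pvRepl, hc2b]
            rw [hqmem]; simp
        · have hcb : (c == q) = false := by
            simp only [beq_eq_false_iff_ne, ne_eq]; exact fun h => hc h.symm
          have hstep : pvScanA q (c :: c2 :: rest2) = pvScanA q (c2 :: rest2) := by
            simp [pvScanA, hcb]
          rw [hstep]
          rw [ih (c2 :: rest2).length (by subst hn; simp) (c2 :: rest2) rfl
                (fun x hx => hsp x (by rw [List.getLast?_cons_cons]; exact hx))]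
          rw [List.getLast?_cons_cons, List.dropLast_cons₂]
          rw [pvRepl_cons_ne q c hcb]
          simp [hc]

lemma pyGet_neg_one_cons (c : Char) (l : List Char) :
    PySem.List.pyGet? (c :: l) (-1) = (c :: l).getLast? := by
  simp [PySem.List.pyGet?, PySem.List.pyIdx?, List.getLast?_eq_getElem?]

lemma slice_one_negone (c : Char) (l : List Char) :
    PySem.List.slice (c :: l) (some 1) (some (-1)) = l.dropLast := by
  simp only [PySem.List.slice, PySem.List.clampIdx]
  simp [List.dropLast_eq_take]
  split_ifs <;> omega

-- ===== VERDICT (by name: the statement is the Claim_ definition above) =====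
theorem is_fortran_string_literal_py_spec : Claim_equal_is_fortran_string_literal_py := by
  intro s _
  unfold Spec_is_fortran_string_literal_py is_fortran_string_literal_py is_fortran_string_literal_py_alt
  match ht : PySem.Chars.strip s.toList with
  | [] => simp
  | [c] => simp
  | q :: c2 :: body =>
      simp only [List.isEmpty_cons, Bool.false_or]
      rw [if_neg (show ¬ ((q :: c2 :: body : List Char).length < 2) from by simp)]
      by_cases hq : (q == '\'' || q == '"') = true
      · simp only [hq, Bool.not_true, Bool.false_or]
        rw [pyGet_neg_one_cons, slice_one_negone, List.getLast?_cons_cons]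
        rw [replace_eq_pvRepl, isIn_singleton_eq_contains]
        rw [scanA_eq q (c2 :: body)
              (fun x hx => strip_getLast_not_space s.toList x
                (by rw [ht, List.getLast?_cons_cons]; exact hx))]
        by_cases hl : ((c2 :: body).getLast? == some q) = true
        · simp [hl]
        · have hx : ((c2 :: body).getLast? == some q) = false := by
            cases h : ((c2 :: body).getLast? == some q) with
            | true => exact absurd h hl
            | false => rfl
          simp [hx]
      · simp [hq]
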